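-- pv_equiv track=rewrite | github.com/airbirdx/fgo-auto-run | psn/psfunc.py | split_turn_seq
-- ===== SOURCE A (Python) =====
-- def split_turn_seq(string=None):
--     lst = []
--     tmp = ''
--     for char in string.upper():
--         # if char >= 'A' and char <= 'Z':
--         if char.isalpha():
--             if tmp != '':
--                 lst.append(tmp)
--                 tmp = ''
--             tmp += char
--         else:
--             tmp += char
--     lst.append(tmp)
--     return lst
-- ===== SOURCE B (Python) =====
-- def split_turn_seq(string=None):
--     s = string.upper()
--     if not s:
--         return ['']
--     out = []
--     i = 0
--     n = len(s)
--     while i < n: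
--         j = i + 1
--         while j < n and not s[j].isalpha():
--             j += 1
--         out.append(s[i:j])
--         i = j
--     return out
-- ===== Notes on version B (the rewrite author's own statement) =====
-- stated objective: alternative
-- what changed: B replaces A's single character-by-character fold with a mutable (lst, tmp) accumulator by an outer loop over token start positions: each step scans the run of non-alphabetic characters after the start, emits that slice as one token, and jumps the index to the next token start.
import Mathlib
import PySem

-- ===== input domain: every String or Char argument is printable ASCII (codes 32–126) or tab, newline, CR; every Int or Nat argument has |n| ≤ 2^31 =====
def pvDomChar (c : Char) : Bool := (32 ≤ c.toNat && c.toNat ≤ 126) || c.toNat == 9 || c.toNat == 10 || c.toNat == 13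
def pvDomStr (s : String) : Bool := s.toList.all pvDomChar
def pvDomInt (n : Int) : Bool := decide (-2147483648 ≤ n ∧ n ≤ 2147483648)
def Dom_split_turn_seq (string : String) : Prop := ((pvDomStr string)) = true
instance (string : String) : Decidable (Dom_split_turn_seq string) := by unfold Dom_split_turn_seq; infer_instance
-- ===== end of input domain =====

-- B replaces A's accumulator fold by a recursion on suffixes (scan the non-alpha run
-- after the head, emit that prefix as a token, recurse on the rest); objective: alternative.


-- ===== PORT A =====
-- A's loop body: state = (lst, tmp), branches in A's order
def pvStepA (st : List (List Char) × List Char) (char : Char) : List (List Char) × List Char :=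
  if PySem.Chars.isalpha char then
    if st.2 ≠ [] then (st.1 ++ [st.2], [char])
    else (st.1, st.2 ++ [char])
  else (st.1, st.2 ++ [char])

def split_turn_seq (string : String) : List String :=
  let p := (PySem.Chars.upper string.toList).foldl pvStepA ([], [])
  (p.1 ++ [p.2]).map String.ofList

-- ===== PORT B =====
-- the inner while loop of B: j advances past non-alphabetic characters;
-- pvScan t = number of leading non-alphabetic characters of t (= j - (i+1))
def pvScan : List Char → Nat
  | [] => 0
  | c :: t => if PySem.Chars.isalpha c then 0 else pvScan t + 1

-- the outer while loop: state = (i, out); s[i:j] = (s.drop i).take (j-i), exact for 0 ≤ i ≤ j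
def pvLoop (s : List Char) (i : Nat) (out : List (List Char)) : List (List Char) :=
  if h : i < s.length then
    let j := i + 1 + pvScan (s.drop (i + 1))
    pvLoop s j (out ++ [(s.drop i).take (j - i)])
  else out
  termination_by s.length - i
  decreasing_by omega

def split_turn_seq_alt (string : String) : List String :=
  let s := PySem.Chars.upper string.toList
  (if s ≠ [] then pvLoop s 0 [] else [[]]).map String.ofList

-- ===== PRECONDITION & SPEC =====
def Spec_split_turn_seq (string : String) (out : List String) : Prop := out = split_turn_seq_alt string
instance (string : String) (out : List String) : Decidable (Spec_split_turn_seq string out) := by unfold Spec_split_turn_seq; infer_instance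

-- ===== CLAIM (what is proved, stated in full; the proofs are below) =====
def Claim_equal_split_turn_seq : Prop := ∀ (string : String), Dom_split_turn_seq string → Spec_split_turn_seq string (split_turn_seq string)

-- ===== LEMMAS AND PROOFS =====

-- recursive view of B's outer loop, used only in the proofs
def pvGo : List Char → List (List Char)
  | [] => []
  | c :: t =>
    ((c :: t).take (pvScan t + 1)) :: pvGo ((c :: t).drop (pvScan t + 1))
  termination_by s => s.length
  decreasing_by
    simp only [List.drop_succ_cons]
    calc (t.drop (pvScan t)).length ≤ t.length := by simp
      _ < (c :: t).length := by simp

lemma pvGo_cons (c : Char) (t : List Char) :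
    pvGo (c :: t) = ((c :: t).take (pvScan t + 1)) :: pvGo ((c :: t).drop (pvScan t + 1)) := by
  rw [pvGo]

lemma pvLoop_eq_go (s : List Char) (i : Nat) (out : List (List Char)) :
    pvLoop s i out = out ++ pvGo (s.drop i) := by
  rw [pvLoop]
  by_cases hi : i < s.length
  · simp only [dif_pos hi]
    have hdrop : s.drop i = s[i] :: s.drop (i + 1) := List.drop_eq_getElem_cons hi
    rw [pvLoop_eq_go s (i + 1 + pvScan (s.drop (i + 1)))]
    have htake : (s.drop i).take (i + 1 + pvScan (s.drop (i + 1)) - i)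
        = (s[i] :: s.drop (i + 1)).take (pvScan (s.drop (i + 1)) + 1) := by
      rw [hdrop]; congr 1; omega
    rw [htake, hdrop, pvGo_cons]
    simp only [List.take_succ_cons, List.drop_succ_cons, List.drop_drop,
      List.append_assoc, List.singleton_append]
  · have h0 : s.drop i = [] := List.drop_eq_nil_of_le (by omega)
    simp [hi, h0, pvGo]
  termination_by s.length - i
  decreasing_by omega

-- A's loop once tmp is nonempty (and tmp stays nonempty from then on)
def pvTokNE : List Char → List Char → List (List Char)
  | [], tmp => [tmp]
  | c :: cs, tmp =>
    if PySem.Chars.isalpha c then tmp :: pvTokNE cs [c] else pvTokNE cs (tmp ++ [c])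

lemma pvFoldA_eq_tokNE (cs : List Char) :
    ∀ (lst : List (List Char)) (tmp : List Char), tmp ≠ [] →
      (cs.foldl pvStepA (lst, tmp)).1 ++ [(cs.foldl pvStepA (lst, tmp)).2]
        = lst ++ pvTokNE cs tmp := by
  induction cs with
  | nil => intro lst tmp _; simp [pvTokNE]
  | cons c cs ih =>
    intro lst tmp htmp
    by_cases h : PySem.Chars.isalpha c = true
    · simp only [List.foldl_cons, pvStepA, h, if_pos, htmp, ne_eq, not_false_eq_true, pvTokNE]
      rw [ih (lst ++ [tmp]) [c] (by simp)]
      simp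
    · simp only [List.foldl_cons, pvStepA, h, if_false, Bool.false_eq_true, pvTokNE]
      rw [ih lst (tmp ++ [c]) (by simp)]

-- A's token recursion equals B's run-slicing recursion
lemma pvTokNE_eq_go (t : List Char) :
    ∀ (tmp : List Char), tmp ≠ [] →
      pvTokNE t tmp = (tmp ++ t.take (pvScan t)) :: pvGo (t.drop (pvScan t)) := by
  induction t with
  | nil => intro tmp _; simp [pvTokNE, pvScan, pvGo]
  | cons a t ih =>
    intro tmp htmp
    by_cases h : PySem.Chars.isalpha a = true
    · simp only [pvTokNE, h, if_true, pvScan, List.take_zero, List.drop_zero,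
        List.append_nil]
      rw [ih [a] (by simp), pvGo_cons]
      simp
    · simp only [pvTokNE, h, Bool.false_eq_true, if_false, pvScan,
        List.take_succ_cons, List.drop_succ_cons]
      rw [ih (tmp ++ [a]) (by simp)]
      simp

-- ===== VERDICT (by name: the statement is the Claim_ definition above) =====
theorem split_turn_seq_spec : Claim_equal_split_turn_seq := by
  intro s _
  show split_turn_seq s = split_turn_seq_alt s
  unfold split_turn_seq split_turn_seq_alt
  cases hcs : PySem.Chars.upper s.toList with
  | nil => simp
  | cons c t =>
    have hstart : pvStepA ([], []) c = ([], [c]) := by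
      simp only [pvStepA]; split_ifs <;> simp_all
    simp only [List.foldl_cons, hstart, ne_eq, reduceCtorEq, not_false_eq_true, if_true]
    rw [pvFoldA_eq_tokNE t [] [c] (by simp), List.nil_append,
        pvTokNE_eq_go t [c] (by simp), pvLoop_eq_go (c :: t) 0 [],
        List.drop_zero, List.nil_append, pvGo_cons]
    simp
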